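-- pv_equiv track=rewrite | github.com/ew5224/DACON-Manufacture-Process-Optimization | ga_code/module/simulator.py | count_event
-- ===== SOURCE A (Python) =====
-- def count_event(df):
--     count_change = [0]
--     time_change = [0]
--     count_stop = 0
--     time_stop = 0
--     for idx, event in enumerate(df):
--         if event.startswith("CHANGE"):
--             if count_change[-1] != event:
--                 count_change.append(event)
--                 time_change.append(1)
--             elif count_change[-1] == event:
--                 time_change[-1] += 1
--         elif event == 'STOP':
--             try:
--                 if df[idx-1] == 'STOP':
--                     time_stop += 1
--                 else:
--                     count_stop += 1
--             except:
--                 count_stop += 1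
--                 time_stop += 1
--     return len(count_change), sum(time_change), count_stop, time_stop
-- ===== SOURCE B (Python) =====
-- def count_event(df):
--     changes = [e for e in df if e.startswith("CHANGE")]
--     groups = sum(1 for i in range(len(changes)) if i == 0 or changes[i] != changes[i - 1])
--     n_stop = sum(1 for e in df if e == 'STOP')
--     time_stop = sum(1 for i, e in enumerate(df) if e == 'STOP' and df[i - 1] == 'STOP')
--     return 1 + groups, len(changes), n_stop - time_stop, time_stop
-- ===== Notes on version B (the rewrite author's own statement) =====
-- stated objective: simpler
-- what changed: A's single interleaved loop with mutable lists is replaced by independent passes: filter the CHANGE events and count group boundaries by index comparison, and count STOP events and STOP-after-STOP pairs directly, deriving count_stop as their difference.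
import Mathlib
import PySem

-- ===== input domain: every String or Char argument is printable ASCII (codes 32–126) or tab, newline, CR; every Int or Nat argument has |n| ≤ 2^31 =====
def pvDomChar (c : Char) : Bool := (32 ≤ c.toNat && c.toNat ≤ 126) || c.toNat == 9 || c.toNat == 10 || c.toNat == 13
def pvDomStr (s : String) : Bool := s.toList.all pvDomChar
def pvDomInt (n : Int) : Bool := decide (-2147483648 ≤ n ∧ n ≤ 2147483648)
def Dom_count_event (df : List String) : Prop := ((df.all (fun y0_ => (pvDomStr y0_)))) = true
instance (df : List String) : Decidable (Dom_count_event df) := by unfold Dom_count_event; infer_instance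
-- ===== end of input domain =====

-- B is a two-pass re-implementation (filter CHANGEs + group-boundary count, then stop counts by
-- predecessor test); same return value as A on every input, objective: simpler decomposition.

-- ===== PORT A =====
-- count_change starts as [0] (an int among strings): modelled as List (Option String) with none for the 0.
def pvStepA (df : List String) (st : List (Option String) × List Int × Int × Int)
    (p : Int × String) : List (Option String) × List Int × Int × Int :=
  let cc := st.1; let tc := st.2.1; let cs := st.2.2.1; let ts := st.2.2.2
  let event := p.2
  if PySem.Str.startswith event "CHANGE" then
    if cc.getLast?.getD none ≠ some event then (cc ++ [some event], tc ++ [(1 : Int)], cs, ts)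
    else (cc, tc.dropLast ++ [tc.getLast?.getD 0 + 1], cs, ts)
  else if event = "STOP" then
    -- try/except: pyGet? none is exactly where Python's df[idx-1] would raise
    match PySem.List.pyGet? df (p.1 - 1) with
    | some prev => if prev = "STOP" then (cc, tc, cs, ts + 1) else (cc, tc, cs + 1, ts)
    | none => (cc, tc, cs + 1, ts + 1)
  else st

def count_event (df : List String) : Int × Int × Int × Int :=
  let r := (PySem.List.enumerate df).foldl (pvStepA df) ([none], [0], 0, 0)
  ((r.1.length : Int), r.2.1.sum, r.2.2.1, r.2.2.2)

-- ===== PORT B =====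
def count_event_alt (df : List String) : Int × Int × Int × Int :=
  let changes := df.filter (fun e => PySem.Str.startswith e "CHANGE")
  let groups : Int :=
    ((List.range changes.length).countP (fun i => i == 0 || changes[i]? != changes[i - 1]?) : Nat)
  let nstop : Int := (df.countP (fun e => e == "STOP") : Nat)
  let tstop : Int :=
    ((PySem.List.enumerate df).countP
      (fun p => p.2 == "STOP" && PySem.List.pyGet? df (p.1 - 1) == some "STOP") : Nat)
  (1 + groups, (changes.length : Int), nstop - tstop, tstop)

-- ===== PRECONDITION & SPEC =====
def Spec_count_event (df : List String) (out : Int × Int × Int × Int) : Prop := out = count_event_alt df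
instance (df : List String) (out : Int × Int × Int × Int) : Decidable (Spec_count_event df out) := by unfold Spec_count_event; infer_instance

-- ===== CLAIM (what is proved, stated in full; the proofs are below) =====
def Claim_equal_count_event : Prop := ∀ (df : List String), Dom_count_event df → Spec_count_event df (count_event df)

-- ===== LEMMAS AND PROOFS =====

def pvGcnt : Option String → List String → Nat
  | _, [] => 0
  | last, c :: rest => (if last = some c then 0 else 1) + pvGcnt (some c) rest

def pvLastAfter (last : Option String) (ys : List String) : Option String :=
  match ys.getLast? with
  | some y => some y
  | none => last

def pvChg (l : List (Int × String)) : List String :=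
  (l.map (·.2)).filter (fun e => PySem.Str.startswith e "CHANGE")

lemma pvNotStop {e : String} (h : PySem.Str.startswith e "CHANGE" = true) : (e == "STOP") = false := by
  by_cases he : e = "STOP"
  · subst he; exact absurd h (by decide)
  · simp [he]

lemma pvSum_bump (tc : List Int) :
    (tc.dropLast ++ [tc.getLast?.getD 0 + 1]).sum = tc.sum + 1 := by
  rcases tc.eq_nil_or_concat with rfl | ⟨ys, y, rfl⟩
  · simp
  · simp [List.dropLast_concat, List.getLast?_concat, List.sum_append]
    ring

lemma pvGcnt_snoc (last : Option String) (ys : List String) (x : String) :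
    pvGcnt last (ys ++ [x]) = pvGcnt last ys + (if pvLastAfter last ys = some x then 0 else 1) := by
  induction ys generalizing last with
  | nil => simp [pvGcnt, pvLastAfter]
  | cons c rest ih =>
    have hla : pvLastAfter last (c :: rest) = pvLastAfter (some c) rest := by
      simp [pvLastAfter, List.getLast?_cons]
      cases rest.getLast? <;> simp
    simp only [List.cons_append, pvGcnt, ih, hla]
    omega

lemma pvGcnt_eq_countP (xs : List String) :
    (List.range xs.length).countP (fun i => i == 0 || xs[i]? != xs[i - 1]?) = pvGcnt none xs := by
  induction xs using List.reverseRecOn with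
  | nil => simp [pvGcnt]
  | append_singleton ys x ih =>
    rw [List.length_append, List.length_singleton, List.range_succ, List.countP_append,
        pvGcnt_snoc]
    have hcongr : (List.range ys.length).countP
        (fun i => i == 0 || (ys ++ [x])[i]? != (ys ++ [x])[i - 1]?)
        = (List.range ys.length).countP (fun i => i == 0 || ys[i]? != ys[i - 1]?) := by
      apply List.countP_congr
      intro i hi
      have hi' : i < ys.length := List.mem_range.mp hi
      rw [List.getElem?_append_left hi', List.getElem?_append_left (by omega)]
    rw [hcongr, ih]
    rcases Nat.eq_zero_or_pos ys.length with hz | hp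
    · have : ys = [] := List.eq_nil_of_length_eq_zero hz
      subst this
      simp [pvLastAfter]
    · have hne : ys ≠ [] := by intro h; subst h; simp at hp
      have hlast : (ys ++ [x])[ys.length]? = some x := by
        simp [List.getElem?_append_right (le_refl ys.length)]
      have hprev : (ys ++ [x])[ys.length - 1]? = ys.getLast? := by
        rw [List.getElem?_append_left (by omega), List.getLast?_eq_getElem?]
      have hla : pvLastAfter none ys = ys.getLast? := by
        simp [pvLastAfter]
        cases h : ys.getLast? with
        | none => exact absurd (List.getLast?_eq_none_iff.mp h) hne
        | some y => simp
      simp only [List.countP_cons, List.countP_nil, hlast, hprev, hla]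
      have h0 : (ys.length == 0) = false := by simp; omega
      rw [h0]
      cases h : ys.getLast? with
      | none => exact absurd (List.getLast?_eq_none_iff.mp h) hne
      | some y =>
        by_cases hxy : y = x
        · subst hxy; simp
        · have h1 : (some x != some y) = true := by simp [bne_iff_ne]; exact fun e => hxy e.symm
          rw [h1]
          simp [hxy]

lemma pvCountP_split {α : Type} (l : List α) (a b : α → Bool) :
    l.countP (fun x => a x && !(b x)) + l.countP (fun x => a x && b x) = l.countP a := by
  induction l with
  | nil => simp
  | cons y t ih =>
    simp only [List.countP_cons]
    cases ha : a y <;> cases hb : b y <;> simp <;> omega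

lemma pvLoopA (df : List String) (l : List (Int × String))
    (h : ∀ p ∈ l, PySem.List.pyGet? df (p.1 - 1) ≠ none)
    (cc : List (Option String)) (tc : List Int) (cs ts : Int) :
    (l.foldl (pvStepA df) (cc, tc, cs, ts)).1.length
        = cc.length + pvGcnt (cc.getLast?.getD none) (pvChg l)
    ∧ (l.foldl (pvStepA df) (cc, tc, cs, ts)).2.1.sum = tc.sum + (pvChg l).length
    ∧ (l.foldl (pvStepA df) (cc, tc, cs, ts)).2.2.1
        = cs + (l.countP (fun p => p.2 == "STOP" && !(PySem.List.pyGet? df (p.1 - 1) == some "STOP")) : Nat)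
    ∧ (l.foldl (pvStepA df) (cc, tc, cs, ts)).2.2.2
        = ts + (l.countP (fun p => p.2 == "STOP" && PySem.List.pyGet? df (p.1 - 1) == some "STOP") : Nat) := by
  induction l generalizing cc tc cs ts with
  | nil => simp [pvChg, pvGcnt]
  | cons p rest ih =>
    have h' : ∀ q ∈ rest, PySem.List.pyGet? df (q.1 - 1) ≠ none := fun q hq => h q (List.mem_cons_of_mem _ hq)
    simp only [List.foldl_cons]
    by_cases hS : PySem.Str.startswith p.2 "CHANGE"
    · have hstop := pvNotStop hS
      have hchg : pvChg (p :: rest) = p.2 :: pvChg rest := by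
        unfold pvChg
        rw [List.map_cons, List.filter_cons, if_pos hS]
      by_cases hL : cc.getLast?.getD none = some p.2
      · have hstep : pvStepA df (cc, tc, cs, ts) p = (cc, tc.dropLast ++ [tc.getLast?.getD 0 + 1], cs, ts) := by
          simp only [pvStepA]
          rw [if_pos hS, if_neg (not_not_intro hL)]
        rw [hstep]
        obtain ⟨i1, i2, i3, i4⟩ := ih h' cc (tc.dropLast ++ [tc.getLast?.getD 0 + 1]) cs ts
        refine ⟨?_, ?_, ?_, ?_⟩
        · rw [i1, hchg]; simp [pvGcnt, hL]
        · rw [i2, hchg, pvSum_bump]; simp; ring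
        · rw [i3]; simp [List.countP_cons, hstop]
        · rw [i4]; simp [List.countP_cons, hstop]
      · have hstep : pvStepA df (cc, tc, cs, ts) p = (cc ++ [some p.2], tc ++ [(1:Int)], cs, ts) := by
          simp only [pvStepA]
          rw [if_pos hS, if_pos hL]
        rw [hstep]
        obtain ⟨i1, i2, i3, i4⟩ := ih h' (cc ++ [some p.2]) (tc ++ [(1:Int)]) cs ts
        refine ⟨?_, ?_, ?_, ?_⟩
        · rw [i1, hchg]
          have : (cc ++ [some p.2]).getLast?.getD none = some p.2 := by simp
          rw [this]
          simp [pvGcnt, hL]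
          omega
        · rw [i2, hchg]; simp [List.sum_append]; ring
        · rw [i3]; simp [List.countP_cons, hstop]
        · rw [i4]; simp [List.countP_cons, hstop]
    · by_cases hSt : p.2 = "STOP"
      · obtain ⟨prev, hP⟩ : ∃ prev, PySem.List.pyGet? df (p.1 - 1) = some prev := by
          cases hx : PySem.List.pyGet? df (p.1 - 1) with
          | none => exact absurd hx (h p (List.mem_cons_self))
          | some v => exact ⟨v, rfl⟩
        have hchg : pvChg (p :: rest) = pvChg rest := by
          unfold pvChg
          rw [List.map_cons, List.filter_cons, if_neg hS]
        by_cases hprev : prev = "STOP"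
        · have hstep : pvStepA df (cc, tc, cs, ts) p = (cc, tc, cs, ts + 1) := by
            simp only [pvStepA]
            rw [if_neg hS, if_pos hSt, hP]
            simp [hprev]
          rw [hstep]
          obtain ⟨i1, i2, i3, i4⟩ := ih h' cc tc cs (ts + 1)
          refine ⟨by rw [i1, hchg], by rw [i2, hchg], ?_, ?_⟩
          · rw [i3]; simp [List.countP_cons, hSt, hP, hprev]
          · rw [i4]; simp [List.countP_cons, hSt, hP, hprev]; push_cast; ring
        · have hstep : pvStepA df (cc, tc, cs, ts) p = (cc, tc, cs + 1, ts) := by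
            simp only [pvStepA]
            rw [if_neg hS, if_pos hSt, hP]
            simp [hprev]
          rw [hstep]
          obtain ⟨i1, i2, i3, i4⟩ := ih h' cc tc (cs + 1) ts
          refine ⟨by rw [i1, hchg], by rw [i2, hchg], ?_, ?_⟩
          · rw [i3]; simp [List.countP_cons, hSt, hP, hprev]; ring
          · rw [i4]; simp [List.countP_cons, hSt, hP, hprev]
      · have hstep : pvStepA df (cc, tc, cs, ts) p = (cc, tc, cs, ts) := by
          simp only [pvStepA]
          rw [if_neg hS, if_neg hSt]
        rw [hstep]
        obtain ⟨i1, i2, i3, i4⟩ := ih h' cc tc cs ts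
        have hchg : pvChg (p :: rest) = pvChg rest := by
          unfold pvChg
          rw [List.map_cons, List.filter_cons, if_neg hS]
        refine ⟨by rw [i1, hchg], by rw [i2, hchg], ?_, ?_⟩
        · rw [i3]; simp [List.countP_cons, hSt]
        · rw [i4]; simp [List.countP_cons, hSt]

-- ===== VERDICT (by name: the statement is the Claim_ definition above) =====
theorem count_event_spec : Claim_equal_count_event := by
  unfold Claim_equal_count_event Spec_count_event
  intro df _
  have hmem : ∀ p ∈ PySem.List.enumerate df 0, PySem.List.pyGet? df (p.1 - 1) ≠ none := by
    intro p hp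
    obtain ⟨k, hk, rfl⟩ := (PySem.List.mem_enumerate_iff _ _ _).mp hp
    intro hnone
    rw [PySem.List.pyGet?_eq_none_iff] at hnone
    apply hnone
    unfold PySem.Raise.InRange
    constructor <;> simp <;> omega
  obtain ⟨h1, h2, h3, h4⟩ := pvLoopA df (PySem.List.enumerate df 0) hmem [none] [0] 0 0
  have hchg : pvChg (PySem.List.enumerate df 0) = df.filter (fun e => PySem.Str.startswith e "CHANGE") := by
    unfold pvChg
    rw [PySem.List.map_snd_enumerate]
  have hall : (PySem.List.enumerate df 0).countP (fun p => p.2 == "STOP")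
      = df.countP (fun e => e == "STOP") := by
    conv_rhs => rw [← PySem.List.map_snd_enumerate df 0]
    rw [List.countP_map]
    rfl
  have hsplit := pvCountP_split (PySem.List.enumerate df 0)
      (fun p => p.2 == "STOP") (fun p => PySem.List.pyGet? df (p.1 - 1) == some "STOP")
  simp only [count_event, count_event_alt, Prod.mk.injEq]
  rw [hchg] at h1 h2
  refine ⟨?_, ?_, ?_, ?_⟩
  · rw [h1, pvGcnt_eq_countP]
    simp
  · rw [h2]
    simp
  · rw [h3, h4] at *
    rw [← hall, ← hsplit]
    push_cast
    ring
  · rw [h4]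
    simp
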